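-- pv_equiv track=rewrite | github.com/jonathanjosh31/FMS-PSGv1.0 | user_interaction/custom_functions.py | pieChart
-- ===== SOURCE A (Python) =====
-- def pieChart(data_list):
--     count_list = [0,0,0]
--     for d in data_list:
--         if d['Temp'] >=90 and d['Temp'] < 95:
--             count_list[0] += 1
--         elif d['Temp'] >=95 and d['Temp'] <100:
--             count_list[1] += 1
--         else:
--             count_list[2] += 1
--     return count_list
-- ===== SOURCE B (Python) =====
-- def pieChart(data_list):
--     data = list(data_list)
--     low = sum(1 for d in data if 90 <= d['Temp'] < 95)
--     mid = sum(1 for d in data if 95 <= d['Temp'] < 100)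
--     return [low, mid, len(data) - low - mid]
-- ===== Notes on version B (the rewrite author's own statement) =====
-- stated objective: alternative
-- what changed: Replaces the single loop mutating a three-slot counter list with two independent range counts and derives the catch-all bucket as the complement len - low - mid.
import Mathlib
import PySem

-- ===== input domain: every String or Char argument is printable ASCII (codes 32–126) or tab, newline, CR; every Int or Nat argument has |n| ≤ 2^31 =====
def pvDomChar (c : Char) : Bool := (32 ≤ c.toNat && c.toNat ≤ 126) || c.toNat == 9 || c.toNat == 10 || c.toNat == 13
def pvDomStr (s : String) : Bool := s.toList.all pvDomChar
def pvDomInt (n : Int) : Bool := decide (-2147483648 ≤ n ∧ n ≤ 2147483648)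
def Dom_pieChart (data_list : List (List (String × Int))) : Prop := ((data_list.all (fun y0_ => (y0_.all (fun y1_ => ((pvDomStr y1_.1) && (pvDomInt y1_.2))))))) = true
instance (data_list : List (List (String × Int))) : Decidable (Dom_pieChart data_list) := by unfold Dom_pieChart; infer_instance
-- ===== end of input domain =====

-- B changes the decomposition only (two range counts + complement); equivalence is about the return value, neither version mutates its argument.

-- ===== PORT A =====
-- d['Temp'] : under Pre_ the key is present; getD's default is never reached there
def pieTempA (d : List (String × Int)) : Int := (((d.find? (fun kv => kv.1 == "Temp")).map (·.2)).getD 0)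

def pieChart (data_list : List (List (String × Int))) : List Int :=
  let c := data_list.foldl (fun (c : Int × Int × Int) d =>
    let t := pieTempA d
    if 90 ≤ t ∧ t < 95 then (c.1 + 1, c.2.1, c.2.2)
    else if 95 ≤ t ∧ t < 100 then (c.1, c.2.1 + 1, c.2.2)
    else (c.1, c.2.1, c.2.2 + 1)) (0, 0, 0)
  [c.1, c.2.1, c.2.2]

-- ===== PORT B =====
def pieChart_alt (data_list : List (List (String × Int))) : List Int :=
  let low : Int := data_list.countP (fun d => decide (90 ≤ pieTempA d ∧ pieTempA d < 95))
  let mid : Int := data_list.countP (fun d => decide (95 ≤ pieTempA d ∧ pieTempA d < 100))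
  [low, mid, (data_list.length : Int) - low - mid]

-- ===== PRECONDITION & SPEC =====
-- Pre_ excludes exactly the inputs where d['Temp'] raises KeyError (a dict without the key "Temp") in both A and B
def Pre_pieChart (data_list : List (List (String × Int))) : Prop :=
  (data_list.all (fun d => (d.find? (fun kv => kv.1 == "Temp")).isSome)) = true
instance (data_list : List (List (String × Int))) : Decidable (Pre_pieChart data_list) := by unfold Pre_pieChart; infer_instance
def pvWitness_pieChart : (List (List (String × Int))) := [[("Temp", 92)], [("Temp", 101)]]

def Spec_pieChart (data_list : List (List (String × Int))) (out : List Int) : Prop := out = pieChart_alt data_list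
instance (data_list : List (List (String × Int))) (out : List Int) : Decidable (Spec_pieChart data_list out) := by unfold Spec_pieChart; infer_instance

-- ===== CLAIM (what is proved, stated in full; the proofs are below) =====
def Claim_equal_pieChart : Prop := ∀ (data_list : List (List (String × Int))), Dom_pieChart data_list → Pre_pieChart data_list → Spec_pieChart data_list (pieChart data_list)

-- ===== LEMMAS AND PROOFS =====
def pLow (d : List (String × Int)) : Bool := decide (90 ≤ pieTempA d ∧ pieTempA d < 95)
def pMid (d : List (String × Int)) : Bool := decide (95 ≤ pieTempA d ∧ pieTempA d < 100)

lemma pie_fold (l : List (List (String × Int))) (a b c : Int) :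
    l.foldl (fun (c : Int × Int × Int) d =>
      let t := pieTempA d
      if 90 ≤ t ∧ t < 95 then (c.1 + 1, c.2.1, c.2.2)
      else if 95 ≤ t ∧ t < 100 then (c.1, c.2.1 + 1, c.2.2)
      else (c.1, c.2.1, c.2.2 + 1)) (a, b, c)
    = (a + l.countP pLow, b + l.countP pMid,
       c + ((l.length : Int) - l.countP pLow - l.countP pMid)) := by
  induction l generalizing a b c with
  | nil => simp
  | cons d l ih =>
    simp only [List.foldl_cons, List.countP_cons, List.length_cons]
    by_cases h1 : 90 ≤ pieTempA d ∧ pieTempA d < 95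
    · have hl : pLow d = true := by simp [pLow, h1]
      have hm : pMid d = false := by simp [pMid]; omega
      simp only [if_pos h1, ih, hl, hm]
      simp only [Prod.mk.injEq]; push_cast; refine ⟨by ring, by ring, by ring⟩
    · by_cases h2 : 95 ≤ pieTempA d ∧ pieTempA d < 100
      · have hl : pLow d = false := by simp [pLow]; omega
        have hm : pMid d = true := by simp [pMid, h2]
        simp only [if_neg h1, if_pos h2, ih, hl, hm]
        simp only [Prod.mk.injEq]; push_cast; refine ⟨by ring, by ring, by ring⟩
      · have hl : pLow d = false := by simp [pLow]; omega
        have hm : pMid d = false := by simp [pMid]; omega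
        simp only [if_neg h1, if_neg h2, ih, hl, hm]
        simp only [Prod.mk.injEq]; push_cast; refine ⟨by ring, by ring, by ring⟩

-- ===== VERDICT (by name: the statement is the Claim_ definition above) =====
theorem pieChart_spec : Claim_equal_pieChart := by
  intro data_list _ _
  unfold Spec_pieChart pieChart pieChart_alt
  rw [pie_fold]
  have hL : pLow = fun d => decide (90 ≤ pieTempA d) && decide (pieTempA d < 95) := by
    funext d; simp [pLow, Bool.decide_and]
  have hM : pMid = fun d => decide (95 ≤ pieTempA d) && decide (pieTempA d < 100) := by
    funext d; simp [pMid, Bool.decide_and]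
  rw [hL, hM]
  simp [Bool.decide_and]
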